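-- pv_equiv track=rewrite | github.com/dododoyo/Competitive-Programming | 0000A2SV/camp_01/week_04/leetcode/sum-of-subarray-minimums.py | getMinCount
-- ===== SOURCE A (Python) =====
-- def getMinCount(arr):
--     mon_stack,n = [],len(arr)
--
--     # each element will span atleast itself
--     solution = [1]*n
--     for i in range(n):
--         while mon_stack and mon_stack[-1][1] >= arr[i]:
--             popped = mon_stack.pop()
--             solution[popped[0]] *= i-popped[0]
--         if mon_stack:
--             max_till = i - mon_stack[-1][0]
--         else:
--             max_till = i+1
--
--         solution[i] *= max_till
--         mon_stack.append([i,arr[i]])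
--
--     while mon_stack:
--         popped = mon_stack.pop()
--         solution[popped[0]] *= n-popped[0]
--     return solution
-- ===== SOURCE B (Python) =====
-- def getMinCount(arr):
--     n = len(arr)
--     res = []
--     for i in range(n):
--         v = arr[i]
--         p = i - 1
--         while p >= 0 and arr[p] >= v:
--             p -= 1
--         q = i + 1
--         while q < n and arr[q] > v:
--             q += 1
--         res.append((i - p) * (q - i))
--     return res
-- ===== Notes on version B (the rewrite author's own statement) =====
-- stated objective: simpler
-- what changed: Replaced the single-pass monotonic stack with deferred in-place multiplications by a direct per-index computation: for each i, scan left for the previous strictly-smaller element and right for the next smaller-or-equal element and emit (i-p)*(q-i); no stack, no mutation.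
import Mathlib
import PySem

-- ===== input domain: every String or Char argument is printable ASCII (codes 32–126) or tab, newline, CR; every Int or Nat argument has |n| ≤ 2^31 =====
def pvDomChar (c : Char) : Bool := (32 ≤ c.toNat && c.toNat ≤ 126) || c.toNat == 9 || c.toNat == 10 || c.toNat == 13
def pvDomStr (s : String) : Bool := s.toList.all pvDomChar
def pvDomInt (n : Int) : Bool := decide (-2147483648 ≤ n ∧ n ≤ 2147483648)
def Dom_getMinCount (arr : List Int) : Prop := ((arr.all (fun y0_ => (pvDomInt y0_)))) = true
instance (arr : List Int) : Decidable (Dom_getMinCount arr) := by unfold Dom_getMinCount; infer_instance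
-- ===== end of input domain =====

-- B replaces A's single-pass monotonic stack (with deferred in-place multiplications) by a
-- per-index pair of direct scans (previous strictly-smaller, next smaller-or-equal); objective: simpler.

-- ===== PORT A =====
-- `solution[j] *= v` ; j is always < solution.length, so getD/set are exact for Python's indexing
def pvMulAt (sol : List Int) (j : Nat) (v : Int) : List Int :=
  sol.set j (sol.getD j 0 * v)

-- the inner `while mon_stack and mon_stack[-1][1] >= arr[i]` pop loop (stack head = top)
def pvPop (i : Nat) (v : Int) : List (Nat × Int) → List Int → List (Nat × Int) × List Int
  | [], sol => ([], sol)
  | (j, w) :: rest, sol =>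
    if v ≤ w then pvPop i v rest (pvMulAt sol j ((i : Int) - (j : Int)))
    else ((j, w) :: rest, sol)

-- one iteration of `for i in range(n)`
def pvStepA (arr : List Int) (s : List (Nat × Int) × List Int) (i : Nat) :
    List (Nat × Int) × List Int :=
  let v := arr.getD i 0          -- arr[i], i < len(arr) always
  let t := pvPop i v s.1 s.2
  let maxTill : Int := match t.1 with
    | [] => (i : Int) + 1
    | (j, _) :: _ => (i : Int) - (j : Int)
  ((i, v) :: t.1, pvMulAt t.2 i maxTill)

-- the final `while mon_stack` drain loop
def pvDrain (n : Nat) : List (Nat × Int) → List Int → List Int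
  | [], sol => sol
  | (j, _) :: rest, sol => pvDrain n rest (pvMulAt sol j ((n : Int) - (j : Int)))

def getMinCount (arr : List Int) : List Int :=
  let n := arr.length
  let t := (List.range n).foldl (pvStepA arr) ([], List.replicate n 1)
  pvDrain n t.1 t.2

-- ===== PORT B =====
-- `p = i-1; while p >= 0 and arr[p] >= v: p -= 1`, returning the final p (may be -1)
def pvPScan (arr : List Int) (v : Int) : Nat → Int
  | 0 => -1
  | k + 1 => if v ≤ arr.getD k 0 then pvPScan arr v k else (k : Int)

-- `q = i+1; while q < n and arr[q] > v: q += 1`, returning the final q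
def pvQScan (arr : List Int) (v : Int) (q : Nat) : Nat :=
  if h : q < arr.length then
    if v < arr.getD q 0 then pvQScan arr v (q + 1) else q
  else q
termination_by arr.length - q

def getMinCount_alt (arr : List Int) : List Int :=
  (List.range arr.length).map (fun i =>
    let v := arr.getD i 0
    ((i : Int) - pvPScan arr v i) * ((pvQScan arr v (i + 1) : Int) - (i : Int)))

-- ===== PRECONDITION & SPEC =====
def Spec_getMinCount (arr : List Int) (out : List Int) : Prop := out = getMinCount_alt arr
instance (arr : List Int) (out : List Int) : Decidable (Spec_getMinCount arr out) := by unfold Spec_getMinCount; infer_instance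

-- ===== CLAIM (what is proved, stated in full; the proofs are below) =====
def Claim_equal_getMinCount : Prop := ∀ (arr : List Int), Dom_getMinCount arr → Spec_getMinCount arr (getMinCount arr)

-- ===== LEMMAS AND PROOFS =====

-- abbreviations used only in the proofs
def pvA (arr : List Int) (j : Nat) : Int := arr.getD j 0
def pvQ (arr : List Int) (j : Nat) : Nat := pvQScan arr (pvA arr j) (j + 1)
def pvF (arr : List Int) (j : Nat) : Nat × Int := (j, pvA arr j)
def pvBv (arr : List Int) (j : Nat) : Int :=
  ((j : Int) - pvPScan arr (pvA arr j) j) * ((pvQ arr j : Int) - (j : Int))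
-- the solution list after i loop iterations, entrywise
def pvG (arr : List Int) (i j : Nat) : Int :=
  if pvQ arr j < i then pvBv arr j
  else if j < i then (j : Int) - pvPScan arr (pvA arr j) j
  else 1
-- the stack after i loop iterations, bottom-first, as indices
def pvLb (arr : List Int) (i : Nat) : List Nat :=
  (List.range i).filter (fun j => decide (i ≤ pvQ arr j))

lemma pvQScan_ge (arr : List Int) (v : Int) (q : Nat) : q ≤ pvQScan arr v q := by
  fun_induction pvQScan <;> omega


lemma pvQScan_le (arr : List Int) (v : Int) (q : Nat) (h : q ≤ arr.length) :
    pvQScan arr v q ≤ arr.length := by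
  fun_induction pvQScan <;> omega


lemma pvQScan_mid (arr : List Int) (v : Int) (q : Nat) :
    ∀ m, q ≤ m → m < pvQScan arr v q → v < arr.getD m 0 := by
  fun_induction pvQScan with
  | case1 q h hv ih =>
      intro m hm1 hm2
      rcases Nat.eq_or_lt_of_le hm1 with rfl | h2
      · exact hv
      · exact ih m h2 hm2
  | case2 q h hv => intro m h1 h2; omega
  | case3 q h => intro m h1 h2; omega


lemma pvQScan_hit (arr : List Int) (v : Int) (q : Nat)
    (h : pvQScan arr v q < arr.length) : arr.getD (pvQScan arr v q) 0 ≤ v := by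
  fun_induction pvQScan with
  | case1 q hq hv ih => exact ih h
  | case2 q hq hv => exact le_of_not_gt hv
  | case3 q hq => omega


lemma pvQScan_eq (arr : List Int) (v : Int) {k : Nat} (hk : k ≤ arr.length)
    (hhit : k < arr.length → arr.getD k 0 ≤ v) :
    ∀ q, q ≤ k → (∀ m, q ≤ m → m < k → v < arr.getD m 0) → pvQScan arr v q = k := by
  intro q
  induction hd : k - q generalizing q with
  | zero =>
      intro hq hmid
      have hqk : q = k := by omega
      subst hqk
      rw [pvQScan]
      split_ifs with h1 h2
      · exact absurd (hhit h1) (not_le.mpr h2)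
      · rfl
      · rfl
  | succ d ih =>
      intro hq hmid
      have hqk : q < k := by omega
      have hqn : q < arr.length := by omega
      rw [pvQScan, dif_pos hqn, if_pos (hmid q le_rfl hqk)]
      exact ih (q + 1) (by omega) (by omega) (fun m h1 h2 => hmid m (by omega) h2)


lemma pvPScan_eq_neg (arr : List Int) (v : Int) :
    ∀ i, (∀ j, j < i → v ≤ arr.getD j 0) → pvPScan arr v i = -1 := by
  intro i
  induction i with
  | zero => intro _; rfl
  | succ i ih =>
      intro h
      rw [pvPScan, if_pos (h i (by omega))]
      exact ih (fun j hj => h j (by omega))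


lemma pvPScan_eq (arr : List Int) (v : Int) {j : Nat} (hja : arr.getD j 0 < v) :
    ∀ i, j < i → (∀ k, j < k → k < i → v ≤ arr.getD k 0) → pvPScan arr v i = (j : Int) := by
  intro i
  induction i with
  | zero => omega
  | succ i ih =>
      intro hji hmid
      rcases Nat.eq_or_lt_of_le (Nat.lt_succ_iff.mp hji) with rfl | hji'
      · rw [pvPScan, if_neg (not_le.mpr hja)]
      · rw [pvPScan, if_pos (hmid i hji' (by omega))]
        exact ih hji' (fun k h1 h2 => hmid k h1 (by omega))


lemma pvQ_gt (arr : List Int) (j : Nat) : j < pvQ arr j := by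
  have := pvQScan_ge arr (pvA arr j) (j + 1)
  unfold pvQ
  omega


lemma pvQ_ge_iff (arr : List Int) {j i : Nat} (hji : j < i) (hin : i ≤ arr.length) :
    i ≤ pvQ arr j ↔ ∀ k, j < k → k < i → pvA arr j < pvA arr k := by
  constructor
  · intro h k hk1 hk2
    exact pvQScan_mid arr (pvA arr j) (j + 1) k (by omega) (by unfold pvQ at h; omega)
  · intro h
    by_contra hc
    rw [not_le] at hc
    have hqn : pvQ arr j < arr.length := lt_of_lt_of_le hc hin
    have hhit : pvA arr (pvQ arr j) ≤ pvA arr j := pvQScan_hit arr (pvA arr j) (j + 1) hqn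
    have hgt : j < pvQ arr j := pvQ_gt arr j
    exact absurd (h (pvQ arr j) hgt hc) (not_lt.mpr hhit)


lemma pv_exists_greatest {P : Nat → Prop} [DecidablePred P] :
    ∀ i k, k < i → P k → ∃ m, m < i ∧ P m ∧ ∀ l, m < l → l < i → ¬ P l := by
  intro i
  induction i with
  | zero => omega
  | succ i ih =>
      intro k hk hP
      by_cases hPi : P i
      · exact ⟨i, by omega, hPi, fun l h1 h2 => absurd h1 (by omega)⟩
      · have hk' : k < i := by
          rcases Nat.lt_succ_iff_lt_or_eq.mp hk with h | rfl
          · exact h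
          · exact absurd hP hPi
        obtain ⟨m, h1, h2, h3⟩ := ih k hk' hP
        exact ⟨m, by omega, h2, fun l hl1 hl2 => by
          rcases Nat.lt_succ_iff_lt_or_eq.mp hl2 with h | rfl
          · exact h3 l hl1 h
          · exact hPi⟩


lemma pvMulAt_map (n : Nat) (g : Nat → Int) (j : Nat) (hj : j < n) (v : Int) :
    pvMulAt ((List.range n).map g) j v
      = (List.range n).map (fun k => if k = j then g j * v else g k) := by
  unfold pvMulAt
  have hget : ((List.range n).map g).getD j 0 = g j := by
    rw [List.getD_eq_getElem?_getD]
    simp [List.getElem?_map, List.getElem?_range, hj]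
  rw [hget]
  apply List.ext_getElem
  · simp
  · intro k h1 h2
    simp only [List.getElem_set, List.getElem_map, List.getElem_range]
    by_cases hkj : k = j
    · simp [hkj]
    · simp [hkj, Ne.symm hkj]


lemma pvPop_spec (arr : List Int) (i : Nat) (hi : i < arr.length) :
    ∀ (R : List Nat) (g : Nat → Int),
      (∀ j ∈ R, j < i ∧ i ≤ pvQ arr j) → R.Pairwise (fun a b => b < a) →
      pvPop i (pvA arr i) (R.map (pvF arr)) ((List.range arr.length).map g)
        = ((R.filter (fun j => decide (i + 1 ≤ pvQ arr j))).map (pvF arr),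
           (List.range arr.length).map
             (fun k => if k ∈ R ∧ pvQ arr k = i then g k * ((i : Int) - (k : Int)) else g k)) := by
  intro R
  induction R with
  | nil =>
      intro g _ _
      simp only [List.map_nil, List.filter_nil]
      rw [pvPop]
      exact congrArg (Prod.mk []) (List.map_congr_left (fun k _ => by simp))
  | cons j rest ih =>
      intro g hmem hpair
      obtain ⟨hji, hQj⟩ := hmem j List.mem_cons_self
      have hvis : ∀ k, j < k → k < i → pvA arr j < pvA arr k :=
        (pvQ_ge_iff arr hji (le_of_lt hi)).mp hQj
      have hjrest : j ∉ rest := fun hmem' =>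
        absurd ((List.pairwise_cons.mp hpair).1 j hmem') (lt_irrefl j)
      simp only [List.map_cons, pvF]
      by_cases hc : pvA arr i ≤ pvA arr j
      · -- popped: pvQ arr j = i
        have hQeq : pvQ arr j = i :=
          pvQScan_eq arr (pvA arr j) (le_of_lt hi) (fun _ => hc) (j + 1) (by omega)
            (fun m h1 h2 => hvis m (by omega) h2)
        rw [pvPop, if_pos hc, pvMulAt_map arr.length g j (lt_trans hji hi)]
        rw [ih (fun k => if k = j then g j * ((i : Int) - (j : Int)) else g k)
              (fun k hk => hmem k (List.mem_cons_of_mem _ hk))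
              (List.Pairwise.of_cons hpair)]
        simp only [Prod.mk.injEq]
        refine ⟨?_, ?_⟩
        · simp [List.filter_cons, hQeq, pvF]
        · apply List.map_congr_left
          intro k _
          by_cases hkj : k = j
          · subst hkj
            simp [hjrest, hQeq]
          · simp [List.mem_cons, hkj]
      · -- not popped: everything on the stack stays
        have hai : pvA arr j < pvA arr i := not_le.mp hc
        have hkeep : ∀ k ∈ j :: rest, i + 1 ≤ pvQ arr k := by
          intro k hk
          rcases List.mem_cons.mp hk with rfl | hkr
          · refine (pvQ_ge_iff arr (by omega) (by omega)).mpr ?_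
            intro m h1 h2
            rcases Nat.lt_succ_iff_lt_or_eq.mp h2 with h | rfl
            · exact hvis m h1 h
            · exact hai
          · obtain ⟨hki, hQk⟩ := hmem k (List.mem_cons_of_mem _ hkr)
            have hkj : k < j := (List.pairwise_cons.mp hpair).1 k hkr
            have hvk : ∀ m, k < m → m < i → pvA arr k < pvA arr m :=
              (pvQ_ge_iff arr hki (le_of_lt hi)).mp hQk
            refine (pvQ_ge_iff arr (by omega) (by omega)).mpr ?_
            intro m h1 h2
            rcases Nat.lt_succ_iff_lt_or_eq.mp h2 with h | rfl
            · exact hvk m h1 h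
            · exact lt_trans (hvk j hkj hji) hai
        rw [pvPop, if_neg hc]
        have hfk : (j :: rest).filter (fun j => decide (i + 1 ≤ pvQ arr j)) = j :: rest :=
          List.filter_eq_self.mpr (fun k hk => decide_eq_true (hkeep k hk))
        rw [hfk]
        simp only [Prod.mk.injEq]
        refine ⟨?_, ?_⟩
        · simp [pvF]
        · apply (List.map_congr_left _).symm
          intro k _
          have : ¬ (k ∈ j :: rest ∧ pvQ arr k = i) := by
            rintro ⟨hmem', hQ⟩
            have := hkeep k hmem'
            omega
          rw [if_neg this]


lemma pvDrain_spec (arr : List Int) :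
    ∀ (R : List Nat) (g : Nat → Int),
      (∀ j ∈ R, j < arr.length) → R.Pairwise (fun a b => b < a) →
      pvDrain arr.length (R.map (pvF arr)) ((List.range arr.length).map g)
        = (List.range arr.length).map
            (fun k => if k ∈ R then g k * ((arr.length : Int) - (k : Int)) else g k) := by
  intro R
  induction R with
  | nil =>
      intro g _ _
      simp only [List.map_nil]
      rw [pvDrain]
      apply List.map_congr_left
      intro k _
      simp
  | cons j rest ih =>
      intro g hmem hpair
      have hj : j < arr.length := hmem j List.mem_cons_self
      have hjrest : j ∉ rest := fun hmem' =>
        absurd ((List.pairwise_cons.mp hpair).1 j hmem') (lt_irrefl j)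
      simp only [List.map_cons, pvF]
      rw [pvDrain, pvMulAt_map arr.length g j hj]
      rw [ih (fun k => if k = j then g j * ((arr.length : Int) - (j : Int)) else g k)
            (fun k hk => hmem k (List.mem_cons_of_mem _ hk))
            (List.Pairwise.of_cons hpair)]
      apply List.map_congr_left
      intro k _
      by_cases hkj : k = j
      · subst hkj
        simp [hjrest]
      · simp [List.mem_cons, hkj]


lemma pv_filter_nil {p : Nat → Bool} {i : Nat} (h : (List.range i).filter p = [])
    {k : Nat} (hk : k < i) : ¬ p k = true := by
  intro hp
  have : k ∈ (List.range i).filter p := List.mem_filter.mpr ⟨List.mem_range.mpr hk, hp⟩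
  rw [h] at this
  exact List.not_mem_nil this


lemma pv_filter_rev_head {p : Nat → Bool} {i j : Nat} {rest : List Nat}
    (h : ((List.range i).filter p).reverse = j :: rest) :
    p j = true ∧ j < i ∧ ∀ k, j < k → k < i → ¬ p k = true := by
  have hjmem : j ∈ (List.range i).filter p := by
    rw [← List.mem_reverse, h]
    exact List.mem_cons_self
  have hsorted : ((List.range i).filter p).reverse.Pairwise (fun a b => b < a) := by
    rw [List.pairwise_reverse]
    exact List.Pairwise.filter p (List.pairwise_lt_range)
  rw [h, List.pairwise_cons] at hsorted
  obtain ⟨hpj, hji⟩ := List.mem_filter.mp hjmem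
  refine ⟨hji, List.mem_range.mp hpj, ?_⟩
  intro k hk1 hk2 hpk
  have : k ∈ j :: rest := by
    rw [← h, List.mem_reverse]
    exact List.mem_filter.mpr ⟨List.mem_range.mpr hk2, hpk⟩
  rcases List.mem_cons.mp this with rfl | hmem
  · omega
  · exact absurd (hsorted.1 k hmem) (by omega)


lemma pvStep_spec (arr : List Int) (i : Nat) (hi : i < arr.length) :
    pvStepA arr (((pvLb arr i).reverse).map (pvF arr), (List.range arr.length).map (pvG arr i)) i
      = (((pvLb arr (i + 1)).reverse).map (pvF arr),
         (List.range arr.length).map (pvG arr (i + 1))) := by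
  have hmem : ∀ j ∈ (pvLb arr i).reverse, j < i ∧ i ≤ pvQ arr j := by
    intro j hj
    simp only [pvLb, List.mem_reverse, List.mem_filter, List.mem_range,
      decide_eq_true_eq] at hj
    exact hj
  have hpair : (pvLb arr i).reverse.Pairwise (fun a b => b < a) := by
    rw [List.pairwise_reverse]
    exact List.Pairwise.filter _ List.pairwise_lt_range
  have harr : arr.getD i 0 = pvA arr i := rfl
  have hQi : i + 1 ≤ pvQ arr i := pvQScan_ge arr (pvA arr i) (i + 1)
  have hfilt : (pvLb arr i).reverse.filter (fun j => decide (i + 1 ≤ pvQ arr j))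
      = ((List.range i).filter (fun j => decide (i + 1 ≤ pvQ arr j))).reverse := by
    rw [pvLb, List.filter_reverse, List.filter_filter]
    congr 1
    apply List.filter_congr
    intro j _
    by_cases h : i + 1 ≤ pvQ arr j
    · simp [h, show i ≤ pvQ arr j by omega]
    · simp [h]
  have hLb1 : pvLb arr (i + 1)
      = ((List.range i).filter (fun j => decide (i + 1 ≤ pvQ arr j))) ++ [i] := by
    rw [pvLb, List.range_succ, List.filter_append]
    simp [List.filter_cons, Nat.lt_of_succ_le hQi]
  simp only [pvStepA, harr]
  rw [pvPop_spec arr i hi _ (pvG arr i) hmem hpair]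
  simp only [hfilt]
  -- the three pieces: the pushed stack, the max_till value, the updated solution
  have hstack : ((i, pvA arr i) :: (((List.range i).filter
        (fun j => decide (i + 1 ≤ pvQ arr j))).reverse).map (pvF arr))
      = ((pvLb arr (i + 1)).reverse).map (pvF arr) := by
    rw [hLb1, List.reverse_append, List.reverse_singleton, List.singleton_append,
      List.map_cons, pvF]
  have hmax : (match (((List.range i).filter
        (fun j => decide (i + 1 ≤ pvQ arr j))).reverse).map (pvF arr) with
      | [] => (i : Int) + 1
      | (j, _) :: _ => (i : Int) - (j : Int))
      = (i : Int) - pvPScan arr (pvA arr i) i := by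
    rcases hSt : ((List.range i).filter (fun j => decide (i + 1 ≤ pvQ arr j))).reverse with
      _ | ⟨j, rest⟩
    · have hfe : (List.range i).filter (fun j => decide (i + 1 ≤ pvQ arr j)) = [] :=
        List.reverse_eq_nil_iff.mp hSt
      have hps : pvPScan arr (pvA arr i) i = -1 := by
        apply pvPScan_eq_neg
        intro j hj
        by_contra hlt
        rw [not_le] at hlt
        obtain ⟨m, hmi, hm, hmax'⟩ :=
          pv_exists_greatest (P := fun l => arr.getD l 0 < pvA arr i) i j hj hlt
        have hQm : i + 1 ≤ pvQ arr m := by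
          refine (pvQ_ge_iff arr (by omega) (by omega)).mpr ?_
          intro k h1 h2
          rcases Nat.lt_succ_iff_lt_or_eq.mp h2 with h | rfl
          · have := hmax' k h1 h
            show pvA arr m < pvA arr k
            unfold pvA at hm ⊢
            omega
          · exact hm
        exact pv_filter_nil hfe hmi (decide_eq_true hQm)
      rw [hps]
      simp only [List.map_nil]
      show (i : Int) + 1 = (i : Int) - (-1)
      ring
    · obtain ⟨hpj, hji, hmaxj⟩ := pv_filter_rev_head hSt
      rw [decide_eq_true_eq] at hpj
      have hja : pvA arr j < pvA arr i :=
        (pvQ_ge_iff arr (show j < i + 1 by omega) (show i + 1 ≤ arr.length by omega)).mp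
          hpj i (by omega) (by omega)
      have hps : pvPScan arr (pvA arr i) i = (j : Int) := by
        apply pvPScan_eq arr (pvA arr i) (show arr.getD j 0 < pvA arr i from hja) i hji
        intro k h1 h2
        by_contra hlt
        rw [not_le] at hlt
        obtain ⟨m, hmi, hm, hmax'⟩ :=
          pv_exists_greatest (P := fun l => arr.getD l 0 < pvA arr i) i k h2 hlt
        have hkm : k ≤ m := by
          by_contra hmk
          exact absurd hlt (hmax' k (by omega) h2)
        have hQm : i + 1 ≤ pvQ arr m := by
          refine (pvQ_ge_iff arr (by omega) (by omega)).mpr ?_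
          intro l hl1 hl2
          rcases Nat.lt_succ_iff_lt_or_eq.mp hl2 with h | rfl
          · have := hmax' l hl1 h
            show pvA arr m < pvA arr l
            unfold pvA at hm ⊢
            omega
          · exact hm
        exact hmaxj m (by omega) hmi (decide_eq_true hQm)
      simp [List.map_cons, pvF, hps]
  have hsol : pvMulAt ((List.range arr.length).map
        (fun k => if k ∈ (pvLb arr i).reverse ∧ pvQ arr k = i
          then pvG arr i k * ((i : Int) - (k : Int)) else pvG arr i k)) i
        ((i : Int) - pvPScan arr (pvA arr i) i)
      = (List.range arr.length).map (pvG arr (i + 1)) := by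
    rw [pvMulAt_map arr.length _ i hi]
    apply List.map_congr_left
    intro k hk
    rw [List.mem_range] at hk
    have hQgtk : k < pvQ arr k := pvQ_gt arr k
    have hiLb : i ∉ (pvLb arr i).reverse := by
      intro hmem'
      exact absurd (hmem i hmem').1 (lt_irrefl i)
    by_cases hki : k = i
    · rw [hki, if_pos rfl, if_neg (fun hcon => hiLb hcon.1)]
      have e1 : pvG arr i i = 1 := by
        unfold pvG
        rw [if_neg (show ¬ pvQ arr i < i by omega), if_neg (lt_irrefl i)]
      have e2 : pvG arr (i + 1) i = (i : Int) - pvPScan arr (pvA arr i) i := by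
        unfold pvG
        rw [if_neg (show ¬ pvQ arr i < i + 1 by omega), if_pos (by omega)]
      rw [e1, e2, one_mul]
    · rw [if_neg hki]
      by_cases hQk : pvQ arr k = i
      · have hkii : k < i := by omega
        have hmemk : k ∈ (pvLb arr i).reverse := by
          simp only [pvLb, List.mem_reverse, List.mem_filter, List.mem_range,
            decide_eq_true_eq]
          omega
        rw [if_pos ⟨hmemk, hQk⟩]
        have e1 : pvG arr i k = (k : Int) - pvPScan arr (pvA arr k) k := by
          unfold pvG
          rw [if_neg (show ¬ pvQ arr k < i by omega), if_pos hkii]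
        have e2 : pvG arr (i + 1) k = pvBv arr k := by
          unfold pvG
          rw [if_pos (show pvQ arr k < i + 1 by omega)]
        rw [e1, e2]
        unfold pvBv
        rw [hQk]
      · rw [if_neg (fun hcon => hQk hcon.2)]
        unfold pvG
        rcases lt_trichotomy (pvQ arr k) i with h | h | h
        · rw [if_pos h, if_pos (show pvQ arr k < i + 1 by omega)]
        · exact absurd h hQk
        · rw [if_neg (show ¬ pvQ arr k < i by omega),
            if_neg (show ¬ pvQ arr k < i + 1 by omega)]
          by_cases hklt : k < i
          · rw [if_pos hklt, if_pos (show k < i + 1 by omega)]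
          · rw [if_neg hklt, if_neg (show ¬ k < i + 1 by omega)]
  rw [hmax, hstack, hsol]

lemma pvLoop (arr : List Int) :
    ∀ i, i ≤ arr.length →
      (List.range i).foldl (pvStepA arr) ([], (List.range arr.length).map (fun _ => (1 : Int)))
        = (((pvLb arr i).reverse).map (pvF arr), (List.range arr.length).map (pvG arr i)) := by
  intro i
  induction i with
  | zero =>
      intro _
      simp only [List.range_zero, List.foldl_nil, pvLb, List.filter_nil,
        List.reverse_nil, List.map_nil]
      refine congrArg (Prod.mk []) ?_
      apply List.map_congr_left
      intro k _
      show (1 : Int) = pvG arr 0 k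
      unfold pvG
      rw [if_neg (show ¬ pvQ arr k < 0 by omega), if_neg (show ¬ k < 0 by omega)]
  | succ i ih =>
      intro h
      rw [List.range_succ, List.foldl_append, List.foldl_cons, List.foldl_nil,
        ih (by omega), pvStep_spec arr i (by omega)]


lemma pv_main (arr : List Int) : getMinCount arr = getMinCount_alt arr := by
  have hrep : List.replicate arr.length (1 : Int)
      = (List.range arr.length).map (fun _ => (1 : Int)) := by
    apply List.ext_getElem
    · simp
    · intro k h1 h2
      simp
  simp only [getMinCount]
  rw [hrep, pvLoop arr arr.length le_rfl]
  have hmem : ∀ j ∈ (pvLb arr arr.length).reverse, j < arr.length := by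
    intro j hj
    simp only [pvLb, List.mem_reverse, List.mem_filter, List.mem_range,
      decide_eq_true_eq] at hj
    exact hj.1
  have hpair : (pvLb arr arr.length).reverse.Pairwise (fun a b => b < a) := by
    rw [List.pairwise_reverse]
    exact List.Pairwise.filter _ List.pairwise_lt_range
  rw [pvDrain_spec arr _ (pvG arr arr.length) hmem hpair]
  simp only [getMinCount_alt]
  apply List.map_congr_left
  intro k hk
  rw [List.mem_range] at hk
  have hQgtk : k < pvQ arr k := pvQ_gt arr k
  by_cases hQk : arr.length ≤ pvQ arr k
  · have hQeq : pvQ arr k = arr.length :=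
      le_antisymm (pvQScan_le arr (pvA arr k) (k + 1) (by omega)) hQk
    have hmemk : k ∈ (pvLb arr arr.length).reverse := by
      simp only [pvLb, List.mem_reverse, List.mem_filter, List.mem_range,
        decide_eq_true_eq]
      omega
    rw [if_pos hmemk]
    have h1 : pvG arr arr.length k = (k : Int) - pvPScan arr (pvA arr k) k := by
      unfold pvG
      rw [if_neg (by omega), if_pos hk]
    rw [h1]
    show ((k : Int) - pvPScan arr (pvA arr k) k) * ((arr.length : Int) - (k : Int))
      = ((k : Int) - pvPScan arr (arr.getD k 0) k)
        * ((pvQScan arr (arr.getD k 0) (k + 1) : Int) - (k : Int))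
    have : pvQScan arr (arr.getD k 0) (k + 1) = arr.length := hQeq
    rw [this]
    rfl
  · have hnot : k ∉ (pvLb arr arr.length).reverse := by
      simp only [pvLb, List.mem_reverse, List.mem_filter, List.mem_range,
        decide_eq_true_eq]
      omega
    rw [if_neg hnot]
    have h1 : pvG arr arr.length k = pvBv arr k := by
      unfold pvG
      rw [if_pos (by omega)]
    rw [h1]
    rfl


-- ===== VERDICT (by name: the statement is the Claim_ definition above) =====
theorem getMinCount_spec : Claim_equal_getMinCount := by
  intro arr _
  unfold Spec_getMinCount
  exact pv_main arr
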